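-- pv_equiv track=rewrite | github.com/daniel-reich/turbo-robot | 6DppMcokmzJ3TtNNB_3.py | true_alphabetic
-- ===== SOURCE A (Python) =====
-- def true_alphabetic(txt):
--   x=txt
--   a=[]
--   fin=''
--   for i in x:
--     a.append(i)
--   for i in range(len(a)):
--     for j in range(i+1,len(a)):
--       if a[i]>a[j] and a[i]!=' ' and a[j]!=' ':
--         a[i],a[j]=a[j],a[i]
--   for i in a:
--     fin+=i
--   return(fin)
-- ===== SOURCE B (Python) =====
-- def true_alphabetic(txt):
--     # sort the non-space characters once, then pour them back into
--     # the non-space positions; spaces stay where they are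
--     ordered = iter(sorted(c for c in txt if c != ' '))
--     return ''.join(c if c == ' ' else next(ordered) for c in txt)
-- ===== Notes on version B (the rewrite author's own statement) =====
-- stated objective: faster
-- what changed: A bubble-style O(n^2) in-place pair-swap over indices is replaced by extracting the non-space characters, sorting them once with sorted(), and pouring them back into the non-space positions in one pass.
import Mathlib
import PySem

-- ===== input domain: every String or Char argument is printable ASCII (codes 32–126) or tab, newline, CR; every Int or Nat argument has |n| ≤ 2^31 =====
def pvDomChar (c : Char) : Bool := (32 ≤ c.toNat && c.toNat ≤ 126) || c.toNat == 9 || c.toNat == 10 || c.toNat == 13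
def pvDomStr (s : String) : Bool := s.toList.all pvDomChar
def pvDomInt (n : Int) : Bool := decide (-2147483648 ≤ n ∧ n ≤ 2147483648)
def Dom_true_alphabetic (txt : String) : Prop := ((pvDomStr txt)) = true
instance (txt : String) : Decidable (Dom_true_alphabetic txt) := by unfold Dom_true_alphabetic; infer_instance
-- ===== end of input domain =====

-- B replaces A's O(n^2) index-pair swapping by sorting the non-space characters once and
-- pouring them back into the non-space positions (objective: faster, asymptotic).

-- ===== PORT A =====
-- body of `if a[i]>a[j] and a[i]!=' ' and a[j]!=' ': a[i],a[j]=a[j],a[i]`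
def pvSwapStep (i : Int) (a : List Char) (j : Int) : List Char :=
  if PySem.List.pyGetD a i ' ' > PySem.List.pyGetD a j ' '
      ∧ PySem.List.pyGetD a i ' ' ≠ ' ' ∧ PySem.List.pyGetD a j ' ' ≠ ' ' then
    PySem.List.pySetD (PySem.List.pySetD a i (PySem.List.pyGetD a j ' ')) j
      (PySem.List.pyGetD a i ' ')
  else a

-- `for j in range(i+1,len(a)): …`
def pvInnerLoop (a : List Char) (i : Int) : List Char :=
  (PySem.List.pyRange (i + 1) (a.length : Int) 1).foldl (pvSwapStep i) a

def true_alphabetic (txt : String) : String :=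
  let x := txt
  let a : List Char := x.toList.foldl (fun acc i => acc ++ [i]) []
  let a := (PySem.List.pyRange 0 (a.length : Int) 1).foldl pvInnerLoop a
  let fin := a.foldl (fun fin i => fin.push i) ""
  fin

-- ===== PORT B =====
-- `''.join(c if c == ' ' else next(ordered) for c in txt)`: consume the sorted chars in order
def pvRefill : List Char → List Char → List Char
  | [], _ => []
  | c :: rest, s =>
    if c = ' ' then c :: pvRefill rest s
    else match s with
      | [] => []                   -- `next` on an exhausted iterator; never reached (counts match)
      | x :: xs => x :: pvRefill rest xs

def true_alphabetic_alt (txt : String) : String :=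
  String.ofList (pvRefill txt.toList
    (PySem.List.sorted (txt.toList.filter (fun c => c ≠ ' ')) (fun c => c)))

-- ===== PRECONDITION & SPEC =====
def Spec_true_alphabetic (txt : String) (out : String) : Prop := out = true_alphabetic_alt txt
instance (txt : String) (out : String) : Decidable (Spec_true_alphabetic txt out) := by unfold Spec_true_alphabetic; infer_instance

-- ===== CLAIM (what is proved, stated in full; the proofs are below) =====
def Claim_equal_true_alphabetic : Prop := ∀ (txt : String), Dom_true_alphabetic txt → Spec_true_alphabetic txt (true_alphabetic txt)

-- ===== LEMMAS AND PROOFS =====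

/-- positions holding a space agree -/
def pvMask (x y : List Char) : Prop :=
  x.length = y.length ∧ ∀ k (h : k < x.length) (h' : k < y.length), (x[k] = ' ') ↔ (y[k] = ' ')

lemma pvMask_refl (x : List Char) : pvMask x x := ⟨rfl, fun _ _ _ => Iff.rfl⟩

lemma pvMask_trans {x y z : List Char} (h1 : pvMask x y) (h2 : pvMask y z) : pvMask x z := by
  obtain ⟨l1, e1⟩ := h1; obtain ⟨l2, e2⟩ := h2
  exact ⟨l1.trans l2, fun k h h' => (e1 k h (by omega)).trans (e2 k (by omega) h')⟩

lemma pv_cons_set_perm : ∀ (xs : List Char) (m : Nat) (x : Char) (hm : m < xs.length),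
    (xs[m] :: xs.set m x).Perm (x :: xs)
  | y :: t, 0, x, _ => by simpa using List.Perm.swap x y t
  | y :: t, m + 1, x, hm => by
    have hm' : m < t.length := by simpa using hm
    exact (List.Perm.swap y t[m] _).trans
      (((pv_cons_set_perm t m x hm').cons y).trans (List.Perm.swap x y t))

lemma pv_set_set_perm : ∀ (a : List Char) (i j : Nat), i < j → ∀ (hj : j < a.length),
    ((a.set i (a.getD j ' ')).set j (a.getD i ' ')).Perm a
  | y :: t, 0, j + 1, _, hj => by
    have hj' : j < t.length := by simpa using hj
    have h1 : (y :: t).getD (j + 1) ' ' = t[j] := by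
      simp [List.getD_eq_getElem?_getD, List.getElem?_eq_getElem hj']
    have h2 : (y :: t).getD 0 ' ' = y := rfl
    rw [h1, h2]
    simpa using pv_cons_set_perm t j y hj'
  | y :: t, i + 1, j + 1, hij, hj => by
    have hj' : j < t.length := by simpa using hj
    have hij' : i < j := by omega
    have h1 : (y :: t).getD (j + 1) ' ' = t.getD j ' ' := rfl
    have h2 : (y :: t).getD (i + 1) ' ' = t.getD i ' ' := rfl
    rw [h1, h2]
    simpa using (pv_set_set_perm t i j hij' hj').cons y

/-- the Nat form of one inner-loop step -/
lemma pvSwapStep_natCast (i j : Nat) (a : List Char) :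
    pvSwapStep (i : Int) a (j : Int) =
      if a.getD i ' ' > a.getD j ' ' ∧ a.getD i ' ' ≠ ' ' ∧ a.getD j ' ' ≠ ' ' then
        (a.set i (a.getD j ' ')).set j (a.getD i ' ')
      else a := by
  simp [pvSwapStep, PySem.List.pyGetD_natCast, PySem.List.pySetD_natCast]

/-- inner-loop invariant for fixed outer index `i`, after scanning `j ∈ (i, jBound)` -/
def pvInnerInv (a₀ : List Char) (i jBound : Nat) (a : List Char) : Prop :=
  a.Perm a₀ ∧ pvMask a₀ a ∧
  (∀ p (h : p < a.length) (h' : p < a₀.length), p < i → a[p] = a₀[p]) ∧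
  (∀ (hi : i < a.length), a[i] ≠ ' ' →
    ∀ q (hq : q < a.length), i < q → q < jBound → a[q] ≠ ' ' → a[i] ≤ a[q])

lemma pvInner_step {a₀ a : List Char} {i j : Nat} (hij : i < j) (hj : j < a.length)
    (h : pvInnerInv a₀ i j a) : pvInnerInv a₀ i (j + 1) (pvSwapStep (i : Int) a (j : Int)) := by
  obtain ⟨hperm, hmask, hpre, hmin⟩ := h
  have hi : i < a.length := lt_trans hij hj
  have hgi : a.getD i ' ' = a[i] := List.getD_eq_getElem _ _ hi
  have hgj : a.getD j ' ' = a[j] := List.getD_eq_getElem _ _ hj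
  rw [pvSwapStep_natCast]
  split_ifs with hc
  · -- swap fires
    obtain ⟨hlt, hins, hjns⟩ := hc
    rw [hgi, hgj] at hlt; rw [hgi] at hins; rw [hgj] at hjns; rw [hgi, hgj]
    have hsw : ((a.set i a[j]).set j a[i]).Perm a := by
      have h := pv_set_set_perm a i j hij hj
      rwa [hgi, hgj] at h
    have hlen : ((a.set i a[j]).set j a[i]).length = a.length := by simp
    have hbget : ∀ k (hk : k < a.length),
        ((a.set i a[j]).set j a[i])[k]'(by simp [hk]) =
          if k = j then a[i] else if k = i then a[j] else a[k] := by
      intro k hk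
      simp only [List.getElem_set]
      split_ifs <;> first | rfl | omega
    refine ⟨hsw.trans hperm, ?_, ?_, ?_⟩
    · refine pvMask_trans hmask ⟨hlen.symm, fun k hk hk' => ?_⟩
      rw [hbget k hk]
      by_cases h1 : k = j
      · subst h1; simp [hins, hjns]
      · by_cases h2 : k = i
        · subst h2; simp [h1, hins, hjns]
        · simp [h1, h2]
    · intro p hp hp' hpi
      rw [hbget p (by simpa using hp), if_neg (by omega), if_neg (by omega)]
      exact hpre p (by simpa using hp) hp' hpi
    · intro hib hbins q hq hiq hqj hqns
      have hq' : q < a.length := by simpa using hq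
      rw [hbget i hi, if_neg (by omega), if_pos rfl] at hbins ⊢
      rw [hbget q hq'] at hqns ⊢
      by_cases h1 : q = j
      · rw [if_pos h1]; exact le_of_lt hlt
      · rw [if_neg h1, if_neg (by omega)]
        rw [if_neg h1, if_neg (by omega)] at hqns
        exact le_trans (le_of_lt hlt) (hmin hi hins q hq' hiq (by omega) hqns)
  · -- no swap
    refine ⟨hperm, hmask, hpre, ?_⟩
    intro hi' hins q hq hiq hqj hqns
    by_cases h1 : q = j
    · subst h1
      rw [hgi, hgj] at hc
      by_contra hle
      exact hc ⟨lt_of_not_ge fun hh => hle hh, hins, hqns⟩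
    · exact hmin hi' hins q hq hiq (by omega) hqns

lemma pvInner_fold : ∀ (k j i : Nat) (a₀ a : List Char), a₀.length - j ≤ k → i < j →
    a.length = a₀.length → pvInnerInv a₀ i j a →
    pvInnerInv a₀ i a₀.length
      (((PySem.List.pyRange (j : Int) (a₀.length : Int) 1)).foldl (pvSwapStep (i : Int)) a)
  | 0, j, i, a₀, a, hk, hij, hlen, hinv => by
    rw [PySem.List.pyRange_one_eq_nil (by omega : (a₀.length : Int) ≤ (j : Int))]
    obtain ⟨h1, h2, h3, h4⟩ := hinv
    exact ⟨h1, h2, h3, fun hi hins q hq hiq hqn => h4 hi hins q hq hiq (by omega)⟩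
  | k + 1, j, i, a₀, a, hk, hij, hlen, hinv => by
    by_cases hjn : j < a₀.length
    · rw [PySem.List.pyRange_one_cons (by omega : (j : Int) < (a₀.length : Int)),
        List.foldl_cons]
      have hstep := pvInner_step hij (by omega : j < a.length) hinv
      have hlen' : (pvSwapStep (i : Int) a (j : Int)).length = a₀.length := by
        rw [pvSwapStep_natCast]; split_ifs <;> simp [hlen]
      have : ((j : Int) + 1) = ((j + 1 : Nat) : Int) := by push_cast; ring
      rw [this]
      exact pvInner_fold k (j + 1) i a₀ _ (by omega) (by omega) hlen' hstep
    · rw [PySem.List.pyRange_one_eq_nil (by omega : (a₀.length : Int) ≤ (j : Int))]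
      obtain ⟨h1, h2, h3, h4⟩ := hinv
      exact ⟨h1, h2, h3, fun hi hins q hq hiq hqn => h4 hi hins q hq hiq (by omega)⟩

/-- outer-loop invariant: every non-space before position `i` is ≤ every later non-space -/
def pvSortedPref (i : Nat) (a : List Char) : Prop :=
  ∀ p q (hp : p < a.length) (hq : q < a.length), p < q → p < i →
    a[p] ≠ ' ' → a[q] ≠ ' ' → a[p] ≤ a[q]

def pvOuterInv (l : List Char) (i : Nat) (a : List Char) : Prop :=
  a.Perm l ∧ pvMask l a ∧ pvSortedPref i a

lemma pv_drop_perm {x y : List Char} (k : Nat) (hp : x.Perm y) (ht : x.take k = y.take k) :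
    (x.drop k).Perm (y.drop k) := by
  have hx := List.take_append_drop k x
  have hy := List.take_append_drop k y
  rw [← hx, ← hy, ht] at hp
  exact (List.perm_append_left_iff _).mp hp

lemma pvOuter_step {l a : List Char} {i : Nat} (hi : i < l.length) (h : pvOuterInv l i a) :
    pvOuterInv l (i + 1) (pvInnerLoop a (i : Int)) := by
  obtain ⟨hperm, hmask, hpref⟩ := h
  have hlen : a.length = l.length := hperm.length_eq
  have hbase : pvInnerInv a i (i + 1) a :=
    ⟨List.Perm.refl a, pvMask_refl a, fun _ _ _ _ => rfl,
      fun _ _ q _ h1 h2 _ => absurd h2 (by omega)⟩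
  have hfold := pvInner_fold a.length (i + 1) i a a (by omega) (by omega) rfl hbase
  have hcast : ((i : Int) + 1) = ((i + 1 : Nat) : Int) := by push_cast; ring
  rw [pvInnerLoop, hcast]
  set r := ((PySem.List.pyRange ((i + 1 : Nat) : Int) (a.length : Int) 1)).foldl
    (pvSwapStep (i : Int)) a with hr
  obtain ⟨rperm, rmask, rpre, rmin⟩ := hfold
  have hrlen : r.length = a.length := rperm.length_eq
  have htake : r.take i = a.take i := by
    apply List.ext_getElem (by simp [hrlen])
    intro k h1 h2
    simp only [List.getElem_take]
    exact rpre k (by simp at h1 ⊢; omega) (by simp at h2 ⊢; omega) (by simp at h1; omega)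
  have hdrop := pv_drop_perm i rperm htake
  refine ⟨rperm.trans hperm, pvMask_trans hmask rmask, ?_⟩
  intro p q hp hq hpq hpi hpns hqns
  rcases Nat.lt_or_ge p i with hpi' | hpi'
  · have hrp : r[p] = a[p]'(by omega) := rpre p hp (by omega) hpi'
    rcases Nat.lt_or_ge q i with hqi | hqi
    · have hrq : r[q] = a[q]'(by omega) := rpre q hq (by omega) hqi
      rw [hrp, hrq]; rw [hrp] at hpns; rw [hrq] at hqns
      exact hpref p q (by omega) (by omega) hpq hpi' hpns hqns
    · -- r[q] sits in the dropped suffix, a permutation of a's suffix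
      have hmem : r[q] ∈ r.drop i := by
        rw [List.mem_iff_getElem]
        exact ⟨q - i, by simp [hrlen]; omega, by rw [List.getElem_drop]; congr 1; omega⟩
      have hmem' : r[q] ∈ a.drop i := hdrop.mem_iff.mp hmem
      rw [List.mem_iff_getElem] at hmem'
      obtain ⟨m, hm, hma⟩ := hmem'
      rw [List.getElem_drop] at hma
      have hm' : i + m < a.length := by simp at hm; omega
      rw [hrp]; rw [hrp] at hpns
      calc a[p]'(by omega) ≤ a[i + m] :=
            hpref p (i + m) (by omega) hm' (by omega) hpi' hpns (by rw [hma]; exact hqns)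
        _ = r[q] := hma
  · have hpi'' : p = i := by omega
    subst hpi''
    exact rmin (by omega) hpns q (by omega) hpq (by omega) hqns

lemma pvOuter_fold : ∀ (k i : Nat) (l a : List Char), l.length - i ≤ k →
    pvOuterInv l i a →
    pvOuterInv l l.length
      ((PySem.List.pyRange (i : Int) (l.length : Int) 1).foldl pvInnerLoop a)
  | 0, i, l, a, hk, hinv => by
    rw [PySem.List.pyRange_one_eq_nil (by omega : (l.length : Int) ≤ (i : Int))]
    obtain ⟨h1, h2, h3⟩ := hinv
    exact ⟨h1, h2, fun p q hp hq hpq hpi => h3 p q hp hq hpq (by omega)⟩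
  | k + 1, i, l, a, hk, hinv => by
    by_cases hin : i < l.length
    · rw [PySem.List.pyRange_one_cons (by omega : (i : Int) < (l.length : Int)),
        List.foldl_cons]
      have hstep := pvOuter_step hin hinv
      have hcast : ((i : Int) + 1) = ((i + 1 : Nat) : Int) := by push_cast; ring
      have := pvOuter_fold k (i + 1) l (pvInnerLoop a (i : Int)) (by omega) hstep
      rwa [hcast]
    · rw [PySem.List.pyRange_one_eq_nil (by omega : (l.length : Int) ≤ (i : Int))]
      obtain ⟨h1, h2, h3⟩ := hinv
      exact ⟨h1, h2, fun p q hp hq hpq hpi => h3 p q hp hq hpq (by omega)⟩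

/-- pouring the filtered suffix of a mask-equal list back in reproduces that list -/
lemma pvRefill_filter : ∀ (x y : List Char), pvMask x y →
    pvRefill x (y.filter (fun c => c ≠ ' ')) = y
  | [], y, h => by
    have : y = [] := List.eq_nil_of_length_eq_zero (by simpa using h.1.symm)
    simp [this, pvRefill]
  | c :: xs, y, h => by
    obtain ⟨hlen, hiff⟩ := h
    cases y with
    | nil => simp at hlen
    | cons d ys =>
      have hhead : (c = ' ') ↔ (d = ' ') := by simpa using hiff 0 (by simp) (by simp)
      have htail : pvMask xs ys := by
        refine ⟨by simpa using hlen, fun k hk hk' => ?_⟩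
        simpa using hiff (k + 1) (by simpa using hk) (by simpa using hk')
      by_cases hc : c = ' '
      · have hd : d = ' ' := hhead.mp hc
        rw [List.filter_cons_of_neg (by simp [hd])]
        simp only [pvRefill, if_pos hc]
        rw [pvRefill_filter xs ys htail, hc, hd]
      · have hd : d ≠ ' ' := fun hh => hc (hhead.mpr hh)
        rw [List.filter_cons_of_pos (by simp [hd])]
        simp only [pvRefill, if_neg hc]
        rw [pvRefill_filter xs ys htail]

lemma pv_foldl_push : ∀ (cs : List Char) (s : String),
    cs.foldl (fun fin i => fin.push i) s = String.ofList (s.toList ++ cs)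
  | [], s => by simp [String.ofList_toList]
  | c :: cs, s => by
    rw [List.foldl_cons, pv_foldl_push cs (s.push c)]
    simp

/-- the characterisation: A's bubble pass produces exactly B's refill of the sorted chars -/
lemma pv_main (l : List Char) :
    (PySem.List.pyRange 0 (l.length : Int) 1).foldl pvInnerLoop l =
      pvRefill l (PySem.List.sorted (l.filter (fun c => c ≠ ' ')) (fun c => c)) := by
  have h0 : ((0 : Nat) : Int) = (0 : Int) := rfl
  have hfold := pvOuter_fold l.length 0 l l (by omega)
    ⟨List.Perm.refl l, pvMask_refl l, fun p q _ _ _ h => absurd h (by omega)⟩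
  rw [← h0] at *
  set r := (PySem.List.pyRange ((0 : Nat) : Int) (l.length : Int) 1).foldl pvInnerLoop l with hr
  obtain ⟨rperm, rmask, rpref⟩ := hfold
  have hrl : r.length = l.length := rperm.length_eq
  have hpw : (r.filter (fun c => c ≠ ' ')).Pairwise (· ≤ ·) := by
    have h1 : r.Pairwise (fun x y => x ≠ ' ' → y ≠ ' ' → x ≤ y) := by
      rw [List.pairwise_iff_getElem]
      intro p q hp hq hpq
      exact fun hx hy => rpref p q hp hq hpq (by omega) hx hy
    refine (h1.filter _).imp_of_mem ?_
    intro a b ha hb hab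
    rw [List.mem_filter] at ha hb
    exact hab (by simpa using ha.2) (by simpa using hb.2)
  have hfperm : (r.filter (fun c => c ≠ ' ')).Perm (l.filter (fun c => c ≠ ' ')) :=
    rperm.filter _
  have hsorted := PySem.List.sorted_id_eq_of_perm_of_pairwise
    (l.filter (fun c => c ≠ ' ')) (r.filter (fun c => c ≠ ' ')) hfperm hpw
  rw [hsorted, pvRefill_filter l r rmask]

-- ===== VERDICT (by name: the statement is the Claim_ definition above) =====
theorem true_alphabetic_spec : Claim_equal_true_alphabetic := by
  intro txt _
  show true_alphabetic txt = true_alphabetic_alt txt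
  rw [true_alphabetic, true_alphabetic_alt]
  simp only [PySem.List.foldl_append_singleton, List.nil_append]
  rw [pv_main txt.toList, pv_foldl_push]
  simp
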